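-- pv_equiv track=rewrite | github.com/raeez/chiral-bar-cobar | compute/lib/quantum_group_root_of_unity_engine.py | fusion_ring_dimensions
-- ===== SOURCE A (Python) =====
-- from typing import Dict, List, Optional, Tuple, Union
--
-- def verlinde_fusion_coefficient(i: int, j: int, k: int, p: int) -> int:
--     """Verlinde fusion coefficient N_{ij}^k for U_q(sl_2) at q^p = 1.
--
--     Type-1 irreps: V_1, V_2, ..., V_{p-1} (dimensions 1, 2, ..., p-1).
--     Fusion rules (level k = p-2):
--        N_{ij}^k = 1 if |i-j| < k < i+j and i+j+k is even and k <= p-1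
--                   0 otherwise
--
--     More precisely, using the SU(2) level-(p-2) WZW convention
--     where reps are labeled by spin s = 0, 1/2, 1, ..., (p-2)/2
--     (or equivalently by dimension n = 2s+1 = 1, 2, ..., p-1):
--
--        N_{n_1, n_2}^{n_3} = 1 if:
--          (a) |n_1 - n_2| + 1 <= n_3 <= n_1 + n_2 - 1  (classical CG condition)
--          (b) n_1 + n_2 + n_3 is odd  (parity)
--          (c) n_3 <= p - 1  (truncation: type-1 only)
--          (d) n_1 + n_2 + n_3 <= 2p - 1  (Verlinde truncation)
--     and 0 otherwise.  Here n_i are dimensions (1-indexed).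
--
--     This matches the Verlinde formula:
--        N_{ij}^k = sum_{s=1}^{p-1} S_{is} S_{js} S_{ks}^* / S_{1s}
--     with S_{ns} = sqrt(2/p) sin(pi*n*s/p).
--     """
--     if i < 1 or j < 1 or k < 1:
--         return 0
--     if i >= p or j >= p or k >= p:
--         return 0
--
--     # Classical CG condition
--     if k < abs(i - j) + 1:
--         return 0
--     if k > i + j - 1:
--         return 0
--
--     # Parity
--     if (i + j + k) % 2 == 0:
--         return 0
--
--     # Verlinde truncation
--     if i + j + k > 2 * p - 1:
--         return 0
--
--     return 1
--
-- def fusion_ring_dimensions(p: int) -> List[int]: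
--     """Dimensions of V_i tensor V_j = direct sum N_{ij}^k V_k.
--
--     Returns: for each i in {1,...,p-1}, the total dimension
--     sum_k N_{i1}^k * k (fusion with the fundamental).
--     """
--     dims = []
--     for i in range(1, p):
--         total = 0
--         for k in range(1, p):
--             total += verlinde_fusion_coefficient(i, 2, k, p) * k
--         dims.append(total)
--     return dims
-- ===== SOURCE B (Python) =====
-- def fusion_ring_dimensions(p):
--     """Closed form: fusing V_i with the fundamental V_2 gives V_{i-1} (+) V_{i+1},
--     with V_{i+1} truncated away when i+1 > p-2's bound; so each dimension is
--     (i-1 when i >= 2) + (i+1 when i <= p-2)."""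
--     return [(i - 1 if i >= 2 else 0) + (i + 1 if i <= p - 2 else 0)
--             for i in range(1, p)]
-- ===== Notes on version B (the rewrite author's own statement) =====
-- stated objective: faster
-- what changed: Replaces the double loop evaluating all p-1 Verlinde coefficients per i with the closed form (i-1 if i>=2) + (i+1 if i<=p-2), since only k=i-1 and k=i+1 ever contribute when fusing with the fundamental.
import Mathlib
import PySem

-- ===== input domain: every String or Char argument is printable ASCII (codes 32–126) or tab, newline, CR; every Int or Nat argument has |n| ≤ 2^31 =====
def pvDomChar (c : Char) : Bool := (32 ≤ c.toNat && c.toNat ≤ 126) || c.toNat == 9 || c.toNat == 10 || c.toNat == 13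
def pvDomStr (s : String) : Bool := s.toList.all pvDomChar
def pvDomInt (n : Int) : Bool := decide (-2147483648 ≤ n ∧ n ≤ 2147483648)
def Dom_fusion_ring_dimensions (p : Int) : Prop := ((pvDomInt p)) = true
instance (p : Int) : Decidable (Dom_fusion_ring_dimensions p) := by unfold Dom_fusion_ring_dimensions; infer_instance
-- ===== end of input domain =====

-- B replaces A's quadratic double loop over all fusion coefficients by the closed form
-- (i-1 if i ≥ 2) + (i+1 if i ≤ p-2) per i: only k = i∓1 ever contribute (objective: faster, O(p) vs O(p^2)).


-- ===== PORT A =====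
def verlinde_fusion_coefficient (i j k p : Int) : Int :=
  if i < 1 ∨ j < 1 ∨ k < 1 then 0
  else if i ≥ p ∨ j ≥ p ∨ k ≥ p then 0
  else if k < |i - j| + 1 then 0
  else if k > i + j - 1 then 0
  else if PySem.Int.mod (i + j + k) 2 = 0 then 0
  else if i + j + k > 2 * p - 1 then 0
  else 1

def fusion_ring_dimensions (p : Int) : List Int :=
  (PySem.List.pyRange 1 p 1).foldl
    (fun dims i =>
      dims ++ [(PySem.List.pyRange 1 p 1).foldl
        (fun total k => total + verlinde_fusion_coefficient i 2 k p * k) 0])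
    []

-- ===== PORT B =====
def fusion_ring_dimensions_alt (p : Int) : List Int :=
  (PySem.List.pyRange 1 p 1).map
    (fun i => (if i ≥ 2 then i - 1 else 0) + (if i ≤ p - 2 then i + 1 else 0))

-- ===== PRECONDITION & SPEC =====
def Spec_fusion_ring_dimensions (p : Int) (out : List Int) : Prop := out = fusion_ring_dimensions_alt p
instance (p : Int) (out : List Int) : Decidable (Spec_fusion_ring_dimensions p out) := by unfold Spec_fusion_ring_dimensions; infer_instance

-- ===== CLAIM (what is proved, stated in full; the proofs are below) =====
def Claim_equal_fusion_ring_dimensions : Prop := ∀ (p : Int), Dom_fusion_ring_dimensions p → Spec_fusion_ring_dimensions p (fusion_ring_dimensions p)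

-- ===== LEMMAS AND PROOFS =====

-- sum over range(a,b) of an indicator supported at one point
theorem pv_sum_ite_pyRange (a b c : Int) (f : Int → Int) :
    ((PySem.List.pyRange a b 1).map (fun k => if k = c then f k else 0)).sum
    = if a ≤ c ∧ c < b then f c else 0 := by
  rw [← List.sum_toFinset _ (PySem.List.nodup_pyRange_one a b), Finset.sum_ite_eq']
  simp [PySem.List.mem_pyRange_one]

-- fusing with the fundamental: the coefficient times k is an indicator at k = i-1 and k = i+1
theorem pv_coeff_char (p i k : Int) (hi1 : 1 ≤ i) (hi2 : i < p) (hk1 : 1 ≤ k) (hk2 : k < p) :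
    verlinde_fusion_coefficient i 2 k p * k =
      (if k = i - 1 then (if 2 ≤ i then k else 0) else 0)
      + (if k = i + 1 then (if i ≤ p - 2 then k else 0) else 0) := by
  unfold verlinde_fusion_coefficient
  rw [PySem.Int.mod_eq_emod_of_pos (by norm_num)]
  rcases abs_cases (i - 2) with ⟨h1, h2⟩ | ⟨h1, h2⟩ <;> rw [h1] <;> split_ifs <;> omega

theorem pv_inner_sum (p i : Int) (hi1 : 1 ≤ i) (hi2 : i < p) :
    (PySem.List.pyRange 1 p 1).foldl
      (fun total k => total + verlinde_fusion_coefficient i 2 k p * k) 0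
    = (if i ≥ 2 then i - 1 else 0) + (if i ≤ p - 2 then i + 1 else 0) := by
  rw [PySem.List.foldl_add, zero_add]
  have hmap : (PySem.List.pyRange 1 p 1).map (fun k => verlinde_fusion_coefficient i 2 k p * k)
      = (PySem.List.pyRange 1 p 1).map (fun k =>
          (if k = i - 1 then (if 2 ≤ i then k else 0) else 0)
          + (if k = i + 1 then (if i ≤ p - 2 then k else 0) else 0)) :=
    List.map_congr_left (fun k hk => by
      rw [PySem.List.mem_pyRange_one] at hk
      exact pv_coeff_char p i k hi1 hi2 hk.1 hk.2)
  rw [hmap, PySem.List.sum_map_add_int, pv_sum_ite_pyRange, pv_sum_ite_pyRange]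
  split_ifs <;> omega

-- ===== VERDICT (by name: the statement is the Claim_ definition above) =====
theorem fusion_ring_dimensions_spec : Claim_equal_fusion_ring_dimensions := by
  intro p _
  unfold Spec_fusion_ring_dimensions fusion_ring_dimensions fusion_ring_dimensions_alt
  rw [PySem.List.foldl_append_singleton_eq_map, List.nil_append]
  exact List.map_congr_left (fun i hi => by
    rw [PySem.List.mem_pyRange_one] at hi
    exact pv_inner_sum p i hi.1 hi.2)
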